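-- pv_equiv track=rewrite | github.com/patata22/BOJ | 백준/Bronze/25814. Heavy Numbers/Heavy Numbers.py | calc
-- ===== SOURCE A (Python) =====
-- def calc(x):
--     x=int(x)
--     l=0
--     total=0
--     while x:
--         total+=x%10
--         x//=10
--         l+=1
--     return l*total
-- ===== SOURCE B (Python) =====
-- def calc(x):
--     s = str(int(x))
--     return len(s) * sum(ord(ch) - ord('0') for ch in s)
-- ===== Notes on version B (the rewrite author's own statement) =====
-- stated objective: idiomatic
-- what changed: Replaces the mod-10/floor-div digit-extraction loop with the decimal string representation: len(s) gives the digit count and a generator sum over the characters gives the digit sum.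
import Mathlib
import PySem

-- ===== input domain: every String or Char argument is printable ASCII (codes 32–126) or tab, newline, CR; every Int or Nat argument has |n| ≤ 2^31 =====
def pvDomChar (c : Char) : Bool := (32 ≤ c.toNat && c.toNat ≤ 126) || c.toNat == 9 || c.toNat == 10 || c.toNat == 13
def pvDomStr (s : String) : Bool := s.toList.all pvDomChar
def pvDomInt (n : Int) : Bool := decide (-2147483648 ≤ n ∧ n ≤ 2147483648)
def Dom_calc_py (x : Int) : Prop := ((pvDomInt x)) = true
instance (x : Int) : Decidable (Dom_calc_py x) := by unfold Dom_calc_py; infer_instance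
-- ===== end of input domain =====

-- B replaces A's mod-10/floor-div digit loop by the decimal string representation
-- (len(s) * sum of character digit values); objective: more idiomatic, same cost.

-- ===== PORT A =====
-- A's while loop: `while x: total += x%10; x //= 10; l += 1`.  The recursion is
-- guarded by `0 < x` only to make it total in Lean: for x < 0 Python's loop never
-- terminates (x floors to -1 and stays), and Pre_ excludes those inputs.
def calcAux (x l total : Int) : Int × Int :=
  if 0 < x then
    calcAux (PySem.Int.floordiv x 10) (l + 1) (total + PySem.Int.mod x 10)
  else (l, total)
termination_by x.toNat
decreasing_by
  have h2 : PySem.Int.floordiv x 10 < x := by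
    rw [PySem.Int.floordiv_eq_ediv_of_pos (by omega)]; omega
  omega

def calc_py (x : Int) : Int :=
  let p := calcAux x 0 0
  p.1 * p.2

-- ===== PORT B =====
def calc_py_alt (x : Int) : Int :=
  let s := PySem.Int.toChars x                 -- s = str(int(x)) (as its character list)
  (s.length : Int) * (s.map (fun ch => (ch.toNat : Int) - 48)).sum   -- ord(ch) - ord('0')

-- ===== PRECONDITION & SPEC =====
-- Pre_ excludes x < 0, on which A's while loop never terminates (x //= 10 converges to -1).
def Pre_calc_py (x : Int) : Prop := 0 ≤ x
instance (x : Int) : Decidable (Pre_calc_py x) := by unfold Pre_calc_py; infer_instance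
def pvWitness_calc_py : Int := 37

def Spec_calc_py (x : Int) (out : Int) : Prop := out = calc_py_alt x
instance (x : Int) (out : Int) : Decidable (Spec_calc_py x out) := by unfold Spec_calc_py; infer_instance

-- ===== CLAIM (what is proved, stated in full; the proofs are below) =====
def Claim_equal_calc_py : Prop := ∀ (x : Int), Dom_calc_py x → Pre_calc_py x → Spec_calc_py x (calc_py x)

-- ===== LEMMAS AND PROOFS =====

-- digit count and digit sum of a natural number, the loop invariants of A's while loop
def dcount (n : Nat) : Nat := if n = 0 then 0 else dcount (n / 10) + 1
  decreasing_by exact Nat.div_lt_self (Nat.pos_of_ne_zero (by assumption)) (by omega)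
def dsum (n : Nat) : Nat := if n = 0 then 0 else n % 10 + dsum (n / 10)
  decreasing_by exact Nat.div_lt_self (Nat.pos_of_ne_zero (by assumption)) (by omega)

lemma calcAux_nat (n : Nat) : ∀ l total : Int,
    calcAux (n : Int) l total = (l + dcount n, total + dsum n) := by
  induction n using Nat.strong_induction_on with
  | _ n ih =>
    intro l total
    rw [calcAux]
    by_cases h0 : n = 0
    · subst h0; simp [dcount, dsum]
    · have hpos : (0 : Int) < (n : Int) := by exact_mod_cast Nat.pos_of_ne_zero h0
      rw [if_pos hpos]
      rw [show ((10 : Int)) = ((10 : Nat) : Int) from rfl,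
          PySem.Int.floordiv_natCast, PySem.Int.mod_natCast]
      rw [ih (n / 10) (Nat.div_lt_self (Nat.pos_of_ne_zero h0) (by omega))]
      conv_rhs => rw [dcount, dsum]
      simp only [if_neg h0]
      push_cast
      exact Prod.ext (by ring) (by ring)

-- Nat.toDigits plumbing: accumulator and fuel lemmas, then the induction form.
lemma toDigitsCore_acc (f : Nat) : ∀ (n : Nat) (l : List Char),
    Nat.toDigitsCore 10 f n l = Nat.toDigitsCore 10 f n [] ++ l := by
  induction f with
  | zero => intro n l; simp [Nat.toDigitsCore]
  | succ f ih =>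
    intro n l
    simp only [Nat.toDigitsCore]
    by_cases h : n / 10 = 0
    · simp [h]
    · simp only [h, if_false]
      rw [ih (n / 10) (Nat.digitChar (n % 10) :: l), ih (n / 10) [Nat.digitChar (n % 10)]]
      simp

lemma toDigitsCore_fuel (n : Nat) : ∀ f g : Nat, n < f → n < g →
    Nat.toDigitsCore 10 f n [] = Nat.toDigitsCore 10 g n [] := by
  induction n using Nat.strong_induction_on with
  | _ n ih =>
    intro f g hf hg
    obtain ⟨f', rfl⟩ : ∃ f', f = f' + 1 := ⟨f - 1, by omega⟩
    obtain ⟨g', rfl⟩ : ∃ g', g = g' + 1 := ⟨g - 1, by omega⟩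
    simp only [Nat.toDigitsCore]
    by_cases h : n / 10 = 0
    · simp [h]
    · have hn : 0 < n := by
        rcases Nat.eq_zero_or_pos n with h0 | h0
        · exact absurd (by simp [h0]) h
        · exact h0
      have hd : n / 10 < n := Nat.div_lt_self hn (by omega)
      simp only [h, if_false]
      rw [toDigitsCore_acc, toDigitsCore_acc g', ih (n / 10) hd f' g' (by omega) (by omega)]

lemma toDigits_step (n : Nat) (h : 10 ≤ n) :
    Nat.toDigits 10 n = Nat.toDigits 10 (n / 10) ++ [Nat.digitChar (n % 10)] := by
  have hne : n / 10 ≠ 0 := by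
    have : 1 ≤ n / 10 := (Nat.one_le_div_iff (by omega)).mpr h
    omega
  show Nat.toDigitsCore 10 (n + 1) n [] = _
  simp only [Nat.toDigitsCore, hne, if_false]
  rw [toDigitsCore_acc]
  rw [toDigitsCore_fuel (n / 10) n (n / 10 + 1) (by omega) (by omega)]
  rfl

lemma toDigits_base (n : Nat) (h : n < 10) : Nat.toDigits 10 n = [Nat.digitChar n] := by
  have h0 : n / 10 = 0 := Nat.div_eq_of_lt h
  show Nat.toDigitsCore 10 (n + 1) n [] = _
  simp [Nat.toDigitsCore, h0, Nat.mod_eq_of_lt h]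

lemma digitChar_val (d : Nat) (h : d < 10) : (Nat.digitChar d).toNat = 48 + d := by
  interval_cases d <;> decide

lemma toDigits_len (n : Nat) (h : 0 < n) : (Nat.toDigits 10 n).length = dcount n := by
  induction n using Nat.strong_induction_on with
  | _ n ih =>
    by_cases h10 : n < 10
    · rw [toDigits_base n h10, dcount, if_neg (by omega), dcount, if_pos (Nat.div_eq_of_lt h10)]
      rfl
    · rw [toDigits_step n (by omega), dcount, if_neg (by omega)]
      have hd : n / 10 < n := Nat.div_lt_self h (by omega)
      have hp : 0 < n / 10 := (Nat.one_le_div_iff (by omega)).mpr (by omega)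
      simp [ih (n / 10) hd hp]

lemma toDigits_sum (n : Nat) (h : 0 < n) :
    ((Nat.toDigits 10 n).map (fun ch => (ch.toNat : Int) - 48)).sum = (dsum n : Int) := by
  induction n using Nat.strong_induction_on with
  | _ n ih =>
    by_cases h10 : n < 10
    · rw [toDigits_base n h10, dsum, if_neg (by omega), dsum, if_pos (Nat.div_eq_of_lt h10)]
      simp [digitChar_val n h10, Nat.mod_eq_of_lt h10]
    · rw [toDigits_step n (by omega), dsum, if_neg (by omega)]
      have hd : n / 10 < n := Nat.div_lt_self h (by omega)
      have hp : 0 < n / 10 := (Nat.one_le_div_iff (by omega)).mpr (by omega)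
      rw [List.map_append, List.sum_append, ih (n / 10) hd hp]
      simp [digitChar_val (n % 10) (Nat.mod_lt n (by omega))]
      omega

-- ===== VERDICT (by name: the statement is the Claim_ definition above) =====
theorem calc_py_spec : Claim_equal_calc_py := by
  intro x _ hpre
  obtain ⟨n, rfl⟩ : ∃ n : Nat, x = (n : Int) := ⟨x.toNat, (Int.toNat_of_nonneg hpre).symm⟩
  have htc : PySem.Int.toChars (n : Int) = Nat.toDigits 10 n := by
    simp [PySem.Int.toChars, Int.not_lt.mpr (Int.natCast_nonneg n)]
  show (calcAux (n : Int) 0 0).1 * (calcAux (n : Int) 0 0).2 =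
      ((PySem.Int.toChars (n : Int)).length : Int) *
        ((PySem.Int.toChars (n : Int)).map (fun ch => (ch.toNat : Int) - 48)).sum
  rw [calcAux_nat n 0 0, htc]
  by_cases h0 : n = 0
  · subst h0; simp [dcount, dsum]
  · have hp : 0 < n := Nat.pos_of_ne_zero h0
    rw [toDigits_len n hp, toDigits_sum n hp]
    simp
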